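-- pv_equiv track=rewrite | github.com/Haseebae/bedrockAgentCore-Workloads | benchmark-distributed/verify_logs.py | _check_rule_1_retry_pattern
-- ===== SOURCE A (Python) =====
-- from collections import defaultdict
--
-- def _check_rule_1_retry_pattern(debug_events: list) -> dict:
--     """
--     Rule 1: Checks if a client-side retry pattern exists in the debug logs.
--     A retry pattern is detected if a single trace_id maps to multiple
--     distinct orchestrator_state_ids.
--     """
--     trace_to_states = defaultdict(set)
--     for event in debug_events:
--         trace_id = event.get("trace_id")
--         orch_state_id = event.get("orchestrator_state_id") or event.get("state_id")
--         if trace_id and trace_id != "unknown_trace" and orch_state_id: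
--             trace_to_states[trace_id].add(orch_state_id)
--
--     result = {}
--     any_retry = False
--     for trace_id, states in trace_to_states.items():
--         has_retry = len(states) > 1
--         result[trace_id] = has_retry
--         if has_retry:
--             any_retry = True
--
--     result["all_trace_state_count_mismatch_pass"] = not any_retry
--     return result
-- ===== SOURCE B (Python) =====
-- def _qualifying(event):
--     trace_id = event.get("trace_id")
--     state = event.get("orchestrator_state_id") or event.get("state_id")
--     if trace_id and trace_id != "unknown_trace" and state:
--         return (trace_id, state)
--     return None
--
-- def _check_rule_1_retry_pattern(debug_events: list) -> dict:
--     # One pass: remember only the first state seen per trace and a bool flag,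
--     # instead of accumulating a set of states per trace.
--     first_state = {}
--     result = {}
--     for event in debug_events:
--         q = _qualifying(event)
--         if q is None:
--             continue
--         t, s = q
--         if t not in first_state:
--             first_state[t] = s
--             result[t] = False
--         elif s != first_state[t]:
--             result[t] = True
--     result["all_trace_state_count_mismatch_pass"] = not any(result.values())
--     return result
-- ===== Notes on version B (the rewrite author's own statement) =====
-- stated objective: simpler
-- what changed: Replaces the per-trace set accumulation plus a second dict-building pass with a single pass that keeps only the first state id seen per trace and a boolean retry flag, then one any() over the flags.
import Mathlib
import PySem

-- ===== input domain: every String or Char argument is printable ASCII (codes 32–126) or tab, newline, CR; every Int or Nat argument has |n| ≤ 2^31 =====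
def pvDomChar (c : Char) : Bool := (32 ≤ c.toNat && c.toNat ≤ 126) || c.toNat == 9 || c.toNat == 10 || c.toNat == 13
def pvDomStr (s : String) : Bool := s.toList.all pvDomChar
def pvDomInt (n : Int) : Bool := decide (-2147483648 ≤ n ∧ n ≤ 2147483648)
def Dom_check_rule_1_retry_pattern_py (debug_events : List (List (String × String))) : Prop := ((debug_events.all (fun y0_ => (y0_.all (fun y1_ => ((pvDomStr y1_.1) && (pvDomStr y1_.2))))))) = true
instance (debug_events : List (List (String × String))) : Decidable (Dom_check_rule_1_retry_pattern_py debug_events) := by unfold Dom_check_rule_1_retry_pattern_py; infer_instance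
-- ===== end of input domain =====

-- B: one pass keeping only the first state id per trace and a boolean retry flag,
-- instead of accumulating a set of state ids per trace and a second dict-building pass (objective: simpler).


-- ===== PORT A =====
-- A-side helper: the loop body of A's first 'for' loop (the guard written inline, as in A)
def pvStepA (d : PySem.Dict String (PySem.Set String)) (event : List (String × String)) :
    PySem.Dict String (PySem.Set String) :=
  let ev := PySem.Dict.mk event
  let trace_id := ev.get? "trace_id"
  let orch_state_id :=
    match ev.get? "orchestrator_state_id" with
    | some s => if s ≠ "" then some s else ev.get? "state_id"
    | none => ev.get? "state_id"
  match trace_id, orch_state_id with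
  | some t, some s =>
      if t ≠ "" ∧ t ≠ "unknown_trace" ∧ s ≠ "" then
        d.modify t PySem.Set.empty (fun st => PySem.Set.add st s)
      else d
  | _, _ => d

def check_rule_1_retry_pattern_py (debug_events : List (List (String × String))) : List (String × Bool) :=
  let trace_to_states := debug_events.foldl pvStepA PySem.Dict.empty
  let ra := trace_to_states.items.foldl
      (fun (acc : PySem.Dict String Bool × Bool) p =>
        let has_retry := decide (1 < p.2.length)
        (acc.1.insert p.1 has_retry, acc.2 || has_retry))
      (PySem.Dict.empty, false)
  (ra.1.insert "all_trace_state_count_mismatch_pass" (!ra.2)).items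

-- ===== PORT B =====
-- B-side helper: Source B's _qualifying
def pvQualifying? (event : List (String × String)) : Option (String × String) :=
  let ev := PySem.Dict.mk event
  let trace_id := ev.get? "trace_id"
  let state :=
    match ev.get? "orchestrator_state_id" with
    | some s => if s ≠ "" then some s else ev.get? "state_id"
    | none => ev.get? "state_id"
  match trace_id, state with
  | some t, some s =>
      if t ≠ "" ∧ t ≠ "unknown_trace" ∧ s ≠ "" then some (t, s) else none
  | _, _ => none

-- B-side helper: the loop body of Source B's single pass over (first_state, result)
def pvStepB (acc : PySem.Dict String String × PySem.Dict String Bool)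
    (event : List (String × String)) :
    PySem.Dict String String × PySem.Dict String Bool :=
  match pvQualifying? event with
  | none => acc
  | some (t, s) =>
    match acc.1.get? t with
    | none => (acc.1.insert t s, acc.2.insert t false)
    | some f => if s ≠ f then (acc.1, acc.2.insert t true) else acc

def check_rule_1_retry_pattern_py_alt (debug_events : List (List (String × String))) : List (String × Bool) :=
  let fr := debug_events.foldl pvStepB (PySem.Dict.empty, PySem.Dict.empty)
  let any_retry := fr.2.values.any (fun b => b)
  (fr.2.insert "all_trace_state_count_mismatch_pass" (!any_retry)).items

-- ===== PRECONDITION & SPEC =====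
def Spec_check_rule_1_retry_pattern_py (debug_events : List (List (String × String))) (out : List (String × Bool)) : Prop := out = check_rule_1_retry_pattern_py_alt debug_events
instance (debug_events : List (List (String × String))) (out : List (String × Bool)) : Decidable (Spec_check_rule_1_retry_pattern_py debug_events out) := by unfold Spec_check_rule_1_retry_pattern_py; infer_instance

-- ===== CLAIM (what is proved, stated in full; the proofs are below) =====
def Claim_equal_check_rule_1_retry_pattern_py : Prop := ∀ (debug_events : List (List (String × String))), Dom_check_rule_1_retry_pattern_py debug_events → Spec_check_rule_1_retry_pattern_py debug_events (check_rule_1_retry_pattern_py debug_events)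

-- ===== LEMMAS AND PROOFS =====

-- the invariant tying A's set-dict to B's (first_state, result) pair
def pvInv (d : PySem.Dict String (PySem.Set String))
    (first : PySem.Dict String String) (res : PySem.Dict String Bool) : Prop :=
  first.items = d.items.map (fun p => (p.1, p.2.headD "")) ∧
  res.items = d.items.map (fun p => (p.1, decide (1 < p.2.length))) ∧
  d.keys.Nodup ∧ ∀ p ∈ d.items, p.2 ≠ []

lemma pvStepA_eq (d : PySem.Dict String (PySem.Set String)) (event : List (String × String)) :
    pvStepA d event =
      match pvQualifying? event with
      | none => d
      | some (t, s) => d.modify t PySem.Set.empty (fun st => PySem.Set.add st s) := by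
  dsimp only [pvStepA, pvQualifying?]
  generalize (PySem.Dict.mk event).get? "trace_id" = t?
  generalize (PySem.Dict.mk event).get? "orchestrator_state_id" = o?
  generalize (PySem.Dict.mk event).get? "state_id" = s?
  rcases t? with _ | t <;> rcases o? with _ | o <;> rcases s? with _ | s <;>
    simp <;> split_ifs <;> simp_all <;> split_ifs <;> simp

lemma pvFoldlPair {α β γ : Type} (l : List γ) (f : α → γ → α) (g : β → γ → β) (a : α) (b : β) :
    l.foldl (fun p x => (f p.1 x, g p.2 x)) (a, b) = (l.foldl f a, l.foldl g b) := by
  induction l generalizing a b with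
  | nil => rfl
  | cons x xs ih => simp only [List.foldl_cons]; exact ih (f a x) (g b x)

lemma pvFoldlOr {γ : Type} (l : List γ) (g : γ → Bool) (b : Bool) :
    l.foldl (fun a x => a || g x) b = (b || l.any g) := by
  induction l generalizing b with
  | nil => simp
  | cons x xs ih => rw [List.foldl_cons, ih, List.any_cons, Bool.or_assoc]

-- adding a member of a nonempty set keeps the head; the head is a member
lemma pvHeadD_mem {st : PySem.Set String} (h : st ≠ []) : st.headD "" ∈ st := by
  cases st with
  | nil => exact absurd rfl h
  | cons a r => simp

lemma pvHead?_add {st : PySem.Set String} (h : st ≠ []) (s : String) :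
    (PySem.Set.add st s).head? = st.head? := by
  rw [PySem.Set.add_eq_ite]
  split_ifs with hm
  · rfl
  · cases st with
    | nil => exact absurd rfl h
    | cons a r => simp

lemma pvAdd_long {st : PySem.Set String} (h : st ≠ []) {s : String}
    (hne : s ≠ st.headD "") : 1 < (PySem.Set.add st s).length := by
  rw [PySem.Set.add_eq_ite]
  cases st with
  | nil => exact absurd rfl h
  | cons a r =>
    simp only [List.headD_cons] at hne
    split_ifs with hm
    · rw [List.mem_cons] at hm
      rcases hm with hm | hm
      · exact absurd hm hne
      · cases r with
        | nil => simp at hm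
        | cons b r' => simp
    · simp

lemma pvStep_inv (event : List (String × String)) (d : PySem.Dict String (PySem.Set String))
    (first : PySem.Dict String String) (res : PySem.Dict String Bool)
    (h : pvInv d first res) :
    pvInv (pvStepA d event) (pvStepB (first, res) event).1 (pvStepB (first, res) event).2 := by
  obtain ⟨h1, h2, hnd, hne⟩ := h
  have hkeysf : first.keys = d.keys := by
    simp [PySem.Dict.keys, h1, List.map_map, Function.comp_def]
  have hkeysr : res.keys = d.keys := by
    simp [PySem.Dict.keys, h2, List.map_map, Function.comp_def]
  rw [pvStepA_eq]
  unfold pvStepB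
  cases hq : pvQualifying? event with
  | none => exact ⟨h1, h2, hnd, hne⟩
  | some ts =>
    obtain ⟨t, s⟩ := ts
    dsimp only []
    by_cases hmem : t ∈ d.keys
    · -- t already has an entry (t, st) in d
      obtain ⟨p, hp0, hpt⟩ := List.mem_map.mp hmem
      obtain ⟨st, hp⟩ : ∃ st, (t, st) ∈ d.items := ⟨p.2, by rw [← hpt, Prod.mk.eta]; exact hp0⟩
      have hget : d.get? t = some st := PySem.Dict.get?_of_mem_items d hp hnd
      have hgetD : d.getD t PySem.Set.empty = st := PySem.Dict.getD_of_mem_items d hp hnd _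
      have hndf : first.keys.Nodup := hkeysf ▸ hnd
      have hfmem : (t, st.headD "") ∈ first.items := by
        rw [h1]; exact List.mem_map.mpr ⟨(t, st), hp, rfl⟩
      have hgf : first.get? t = some (st.headD "") :=
        PySem.Dict.get?_of_mem_items first hfmem hndf
      have hstne : st ≠ [] := hne (t, st) hp
      have hcont : d.contains t = true := by
        rw [PySem.Dict.contains_eq_decide_mem_keys]; simpa using hmem
      have huniq : ∀ p ∈ d.items, p.1 = t → p = (t, st) := by
        intro p hp' hpt'
        have : d.get? p.1 = some p.2 := PySem.Dict.get?_of_mem_items d (by simpa using hp') hnd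
        rw [hpt', hget] at this
        exact Prod.ext hpt' (by simpa using this.symm)
      have hitems' : (d.modify t PySem.Set.empty (fun st => PySem.Set.add st s)).items
          = d.items.map (fun p => if p.1 == t then (t, PySem.Set.add st s) else p) := by
        unfold PySem.Dict.modify
        rw [hgetD, PySem.Dict.items_insert_of_contains d _ hcont]
      have hkeys' : (d.modify t PySem.Set.empty (fun st => PySem.Set.add st s)).keys = d.keys := by
        simp only [PySem.Dict.keys, hitems', List.map_map]
        apply List.map_congr_left
        intro p _
        by_cases hbt : p.1 = t <;> simp [hbt]
      rw [hgf]
      dsimp only []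
      split_ifs with hsf
      · -- s differs from the first state: flag the trace
        refine ⟨?_, ?_, hkeys' ▸ hnd, ?_⟩
        · rw [h1, hitems', List.map_map]
          apply List.map_congr_left
          intro p hp'
          by_cases hbt : p.1 = t
          · have hpe := huniq p hp' hbt
            subst hpe
            simp [pvHead?_add hstne]
          · simp [hbt]
        · have hcr : res.contains t = true := by
            rw [PySem.Dict.contains_eq_decide_mem_keys, hkeysr]; simpa using hmem
          rw [PySem.Dict.items_insert_of_contains res _ hcr, h2, hitems', List.map_map, List.map_map]
          apply List.map_congr_left
          intro p hp'
          by_cases hbt : p.1 = t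
          · have hpe := huniq p hp' hbt
            subst hpe
            simp [pvAdd_long hstne hsf]
          · simp [hbt]
        · intro p hp'
          rw [hitems'] at hp'
          obtain ⟨q, hq', hqe⟩ := List.mem_map.mp hp'
          by_cases hbt : q.1 = t
          · rw [if_pos (by simpa using hbt)] at hqe
            subst hqe
            show PySem.Set.add st s ≠ []
            rw [PySem.Set.add_eq_ite]
            split_ifs
            · exact hstne
            · simp
          · rw [if_neg (by simpa using hbt)] at hqe
            subst hqe
            exact hne q hq'
      · -- s equals the first state: the set does not change
        rw [not_not] at hsf
        have hsadd : PySem.Set.add st s = st := by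
          rw [hsf]; exact PySem.Set.add_of_mem (pvHeadD_mem hstne)
        have hsame : (d.modify t PySem.Set.empty (fun st => PySem.Set.add st s)).items = d.items := by
          rw [hitems', hsadd]
          conv_rhs => rw [← List.map_id d.items]
          apply List.map_congr_left
          intro p hp'
          by_cases hbt : p.1 = t
          · rw [if_pos (by simpa using hbt)]; exact (huniq p hp' hbt).symm
          · rw [if_neg (by simpa using hbt)]; rfl
        refine ⟨?_, ?_, hkeys' ▸ hnd, ?_⟩
        · rw [hsame, h1]
        · rw [hsame, h2]
        · intro p hp'; rw [hsame] at hp'; exact hne p hp'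
    · -- fresh trace id
      have hcont : d.contains t = false := by
        rw [PySem.Dict.contains_eq_decide_mem_keys]; simpa using hmem
      have hgf : first.get? t = none := by
        rw [PySem.Dict.get?_eq_none_iff_not_mem_keys, hkeysf]; exact hmem
      have hcf : first.contains t = false := by
        rw [PySem.Dict.contains_eq_decide_mem_keys, hkeysf]; simpa using hmem
      have hcr : res.contains t = false := by
        rw [PySem.Dict.contains_eq_decide_mem_keys, hkeysr]; simpa using hmem
      have hgetD : d.getD t PySem.Set.empty = PySem.Set.empty :=
        PySem.Dict.getD_of_not_contains d PySem.Set.empty hcont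
      have hitems' : (d.modify t PySem.Set.empty (fun st => PySem.Set.add st s)).items
          = d.items ++ [(t, [s])] := by
        unfold PySem.Dict.modify
        rw [hgetD, PySem.Dict.items_insert_of_not_contains d _ hcont]
        rfl
      rw [hgf]
      dsimp only []
      refine ⟨?_, ?_, ?_, ?_⟩
      · rw [PySem.Dict.items_insert_of_not_contains first _ hcf, h1, hitems']
        simp
      · rw [PySem.Dict.items_insert_of_not_contains res _ hcr, h2, hitems']
        simp
      · simp only [PySem.Dict.keys, hitems', List.map_append]
        rw [List.nodup_append]
        refine ⟨hnd, by simp, ?_⟩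
        intro a ha b hb
        simp only [List.map_cons, List.map_nil, List.mem_singleton] at hb
        subst hb
        exact fun hab => hmem (hab ▸ ha)
      · intro p hp'
        rw [hitems'] at hp'
        rcases List.mem_append.mp hp' with hp' | hp'
        · exact hne p hp'
        · simp at hp'; subst hp'; simp

lemma pvLoop (events : List (List (String × String))) :
    ∀ (d : PySem.Dict String (PySem.Set String)) (first : PySem.Dict String String)
      (res : PySem.Dict String Bool), pvInv d first res →
      pvInv (events.foldl pvStepA d)
        ((events.foldl pvStepB (first, res)).1) ((events.foldl pvStepB (first, res)).2) := by
  induction events with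
  | nil => intro d first res h; exact h
  | cons e rest ih =>
    intro d first res h
    simp only [List.foldl_cons]
    have hstep := pvStep_inv e d first res h
    have := ih (pvStepA d e) ((pvStepB (first, res) e).1) ((pvStepB (first, res) e).2) hstep
    simpa using this

theorem check_rule_1_retry_pattern_py_spec : Claim_equal_check_rule_1_retry_pattern_py := by
  intro events _
  unfold Spec_check_rule_1_retry_pattern_py
  unfold check_rule_1_retry_pattern_py check_rule_1_retry_pattern_py_alt
  have hinv := pvLoop events PySem.Dict.empty PySem.Dict.empty PySem.Dict.empty
    ⟨rfl, rfl, List.nodup_nil, by intro p hp; simp [PySem.Dict.empty] at hp⟩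
  obtain ⟨h1, h2, hnd, hne⟩ := hinv
  set d := events.foldl pvStepA PySem.Dict.empty with hd
  set fr := events.foldl pvStepB (PySem.Dict.empty, PySem.Dict.empty) with hfr
  -- phase 2 of A, split into its dict and bool components
  have hpair := pvFoldlPair d.items
      (fun (a : PySem.Dict String Bool) (p : String × PySem.Set String) => a.insert p.1 (decide (1 < p.2.length)))
      (fun (b : Bool) (p : String × PySem.Set String) => b || decide (1 < p.2.length))
      PySem.Dict.empty false
  simp only []
  rw [hpair]
  have hfresh : (d.items.foldl (fun (a : PySem.Dict String Bool) p => a.insert p.1 (decide (1 < p.2.length))) PySem.Dict.empty).items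
      = d.items.map (fun p => (p.1, decide (1 < p.2.length))) := by
    have := PySem.Dict.items_foldl_insert_fresh d.items (fun p => p.1)
      (fun p => decide (1 < p.2.length)) PySem.Dict.empty
      (by intro a _; simp) (by simpa [PySem.Dict.keys] using hnd)
    simpa using this
  have hdict : (d.items.foldl (fun (a : PySem.Dict String Bool) p => a.insert p.1 (decide (1 < p.2.length))) PySem.Dict.empty) = fr.2 := by
    apply PySem.Dict.ext
    rw [hfresh, h2]
  have hany : (d.items.foldl (fun (b : Bool) p => b || decide (1 < p.2.length)) false)
      = fr.2.values.any (fun b => b) := by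
    rw [pvFoldlOr]
    simp only [PySem.Dict.values, h2, List.map_map, List.any_map]
    simp [Function.comp_def]
  rw [hdict, hany]
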